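-- pv_equiv track=rewrite | github.com/qeedquan/challenges | hacker_rank/functions-or-not.py | function
-- ===== SOURCE A (Python) =====
-- def function(p):
--     m = {}
--     for x, y in p:
--         if x not in m:
--             m[x] = y
--         if m[x] != y:
--             return False
--     return True
-- ===== SOURCE B (Python) =====
-- def function(p):
--     m = {}
--     for x, y in p:
--         m.setdefault(x, []).append(y)
--     for ys in m.values():
--         for y in ys:
--             if y != ys[0]:
--                 return False
--     return True
-- ===== Notes on version B (the rewrite author's own statement) =====
-- stated objective: alternative
-- what changed: Replaces the single early-returning pass with a first-seen dict by a two-phase decomposition: group all y-values per x into lists, then verify each group is constant.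
import Mathlib
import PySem

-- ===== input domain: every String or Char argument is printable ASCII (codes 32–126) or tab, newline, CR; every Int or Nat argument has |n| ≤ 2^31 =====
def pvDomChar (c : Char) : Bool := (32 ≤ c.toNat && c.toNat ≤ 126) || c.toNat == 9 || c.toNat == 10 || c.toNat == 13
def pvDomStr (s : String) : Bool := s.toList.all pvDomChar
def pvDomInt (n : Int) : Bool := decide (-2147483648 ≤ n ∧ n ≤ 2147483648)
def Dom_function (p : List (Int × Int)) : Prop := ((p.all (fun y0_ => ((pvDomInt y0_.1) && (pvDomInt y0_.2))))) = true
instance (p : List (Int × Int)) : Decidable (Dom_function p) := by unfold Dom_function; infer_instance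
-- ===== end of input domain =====

-- B is an alternative two-phase decomposition (group y-values per x, then check each group constant); same O(n) cost, return value identical.

-- ===== PORT A =====
-- A: one pass, first-seen dict, early return on mismatch
def functionGo (m : PySem.Dict Int Int) : List (Int × Int) → Bool
  | [] => true
  | (x, y) :: rest =>
    let m' := if !(m.contains x) then m.insert x y else m
    if m'.getD x 0 != y then false else functionGo m' rest

def function (p : List (Int × Int)) : Bool :=
  functionGo PySem.Dict.empty p

-- ===== PORT B =====
def function_alt (p : List (Int × Int)) : Bool :=
  let m := p.foldl (fun d q => d.modify q.1 [] (fun l => l ++ [q.2])) PySem.Dict.empty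
  m.values.all (fun ys => ys.all (fun y => y == ys.headD 0))

-- ===== PRECONDITION & SPEC =====
def Spec_function (p : List (Int × Int)) (out : Bool) : Prop := out = function_alt p
instance (p : List (Int × Int)) (out : Bool) : Decidable (Spec_function p out) := by unfold Spec_function; infer_instance

-- ===== CLAIM (what is proved, stated in full; the proofs are below) =====
def Claim_equal_function : Prop := ∀ (p : List (Int × Int)), Dom_function p → Spec_function p (function p)

-- ===== LEMMAS AND PROOFS =====

theorem all_congr' {A : Type} (l : List A) (f g : A → Bool)
    (h : ∀ x ∈ l, f x = g x) : l.all f = l.all g := by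
  induction l with
  | nil => rfl
  | cons hd tl ih =>
    simp only [List.all_cons]
    rw [h hd (by simp), ih (fun x hx => h x (by simp [hx]))]

-- first y-value paired with x in p (0 if none)
def firstIn (p : List (Int × Int)) (x : Int) : Int :=
  (((p.find? (fun q => q.1 == x)).map (·.2)).getD 0)

theorem firstIn_cons_self (x y : Int) (rest : List (Int × Int)) :
    firstIn ((x, y) :: rest) x = y := by
  simp [firstIn, List.find?]

theorem firstIn_cons_ne (x y x' : Int) (rest : List (Int × Int)) (h : x' ≠ x) :
    firstIn ((x, y) :: rest) x' = firstIn rest x' := by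
  have hb : (x == x') = false := by simp [Ne.symm h]
  simp [firstIn, List.find?, hb]

-- characterisation of A's loop
theorem functionGo_eq (l : List (Int × Int)) (m : PySem.Dict Int Int) :
    functionGo m l = l.all (fun q => ((m.get? q.1).getD (firstIn l q.1)) == q.2) := by
  induction l generalizing m with
  | nil => rfl
  | cons hd tl ih =>
    obtain ⟨x, y⟩ := hd
    simp only [functionGo]
    by_cases hc : m.contains x = true
    · simp only [hc, Bool.not_true, Bool.false_eq_true, if_false]
      obtain ⟨v, h⟩ : ∃ v, m.get? x = some v := by
        rcases hv : m.get? x with _ | v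
        · rw [PySem.Dict.get?_eq_none_iff_contains] at hv
          rw [hv] at hc; cases hc
        · exact ⟨v, rfl⟩
      rw [PySem.Dict.getD_of_get?_eq_some m 0 h]
      by_cases hv : v = y
      · subst hv
        simp only [bne_self_eq_false, Bool.false_eq_true, if_false, ih]
        simp only [List.all_cons, h, Option.getD_some, BEq.rfl, Bool.true_and]
        apply all_congr'
        intro q _
        by_cases hx : q.1 = x
        · simp [hx, h]
        · rw [firstIn_cons_ne x v q.1 tl hx]
      · have hb : (v != y) = true := by simp [hv]
        rw [hb, if_pos rfl]
        symm
        simp [List.all_cons, h, hv]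
    · have hc' : m.contains x = false := by simpa using hc
      simp only [hc', Bool.not_false, if_true]
      have hnone : m.get? x = none := (PySem.Dict.get?_eq_none_iff_contains m x).mpr hc'
      have hins : (m.insert x y).get? x = some y := PySem.Dict.get?_insert_self m x y
      rw [PySem.Dict.getD_of_get?_eq_some _ 0 hins]
      simp only [bne_self_eq_false, Bool.false_eq_true, if_false, ih]
      simp only [List.all_cons, hnone, Option.getD_none, firstIn_cons_self, BEq.rfl, Bool.true_and]
      apply all_congr'
      intro q _
      by_cases hx : q.1 = x
      · rw [hx, hins, hnone, firstIn_cons_self]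
        rfl
      · rw [PySem.Dict.get?_insert_of_ne m y hx, firstIn_cons_ne x y q.1 tl hx]

theorem function_eq (p : List (Int × Int)) :
    function p = p.all (fun q => firstIn p q.1 == q.2) := by
  rw [function, functionGo_eq]
  apply all_congr'
  intro q _
  rw [PySem.Dict.get?_empty, Option.getD_none]

-- the head of a group is the first y for that key
theorem head_filter_eq_firstIn (p : List (Int × Int)) (k : Int) :
    (((p.filter (fun q => q.1 == k)).map (·.2)).headD 0) = firstIn p k := by
  induction p with
  | nil => rfl
  | cons hd tl ih =>
    obtain ⟨x, y⟩ := hd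
    by_cases hx : x = k
    · subst hx
      simp [firstIn_cons_self]
    · have hb : (x == k) = false := by simp [hx]
      rw [firstIn_cons_ne x y k tl (Ne.symm hx), ← ih]
      simp [hb]

theorem function_spec' (p : List (Int × Int)) : function p = function_alt p := by
  rw [function_eq, function_alt]
  set m := p.foldl (fun d q => d.modify q.1 [] (fun l => l ++ [q.2])) PySem.Dict.empty with hm
  have hkeys : m.keys = PySem.Set.ofList (p.map (·.1)) := by
    rw [hm, PySem.Dict.keys_foldl_modify_key p (fun q => q.1) [] (fun _ q l => l ++ [q.2]) PySem.Dict.empty]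
    rw [PySem.Dict.keys_empty, PySem.Set.update_nil_left]
  have hnd : m.keys.Nodup := by
    rw [hkeys]; exact PySem.Set.nodup_ofList _
  have hget : ∀ k, m.getD k [] = (p.filter (fun q => q.1 == k)).map (·.2) := by
    intro k
    rw [hm, PySem.Dict.getD_foldl_modify_append, PySem.Dict.getD_empty, List.nil_append]
  rw [PySem.Dict.values_eq_map_keys m hnd ([] : List Int), hkeys]
  rw [List.all_map, Bool.eq_iff_iff, List.all_eq_true, List.all_eq_true]
  simp only [Function.comp_apply]
  constructor <;> intro h
  · intro k hk
    rw [List.all_eq_true]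
    intro yv hys
    rw [hget k] at hys
    rw [hget k, head_filter_eq_firstIn]
    simp only [List.mem_map, List.mem_filter] at hys
    obtain ⟨q, ⟨hq, hqk⟩, rfl⟩ := hys
    have hq' := h q hq
    rw [beq_iff_eq] at hqk hq' ⊢
    rw [← hqk]
    exact hq'.symm
  · intro q hq
    have hk : q.1 ∈ PySem.Set.ofList (p.map (·.1)) :=
      (PySem.Set.mem_ofList _ _).mpr (List.mem_map_of_mem hq)
    have h2 := h q.1 hk
    rw [List.all_eq_true] at h2
    have hmem : q.2 ∈ m.getD q.1 [] := by
      rw [hget]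
      simp only [List.mem_map, List.mem_filter]
      exact ⟨q, ⟨hq, by simp⟩, rfl⟩
    have := h2 q.2 hmem
    rw [hget, head_filter_eq_firstIn] at this
    rw [beq_iff_eq] at this ⊢
    exact this.symm

-- ===== VERDICT (by name: the statement is the Claim_ definition above) =====
theorem function_spec : Claim_equal_function := by
  intro p _
  exact function_spec' p
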